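-- pv_equiv track=rewrite | github.com/gingami/pyworks | comparison.py | gen_U4
-- ===== SOURCE A (Python) =====
-- def gen_U4(K, P):
--     U4=set()
--     min=None
--     for s in K:
--         length = len(F(P, s))
--         if min is None:
--             min = length
--         elif min > length:
--             min = length
--     for s in K:
--         if len(F(P, s)) == min:
--             U4.add(s)
--     return U4
--
-- def F(P, s):
--     F=set()
--     for path in P:
--         if s in path:
--             F.add(path)
--     return F
-- ===== SOURCE B (Python) =====
-- def gen_U4(K, P):
--     # Inverted traversal: one counter per distinct key, one pass over the distinct
--     # paths incrementing the counters, then min + filter.  No per-key path sets.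
--     counts = dict.fromkeys(K, 0)
--     for p in dict.fromkeys(P):
--         for s in counts:
--             if s in p:
--                 counts[s] += 1
--     if not counts:
--         return set()
--     m = min(counts.values())
--     return {s for s in K if counts[s] == m}
-- ===== Notes on version B (the rewrite author's own statement) =====
-- stated objective: faster
-- what changed: B inverts the traversal: instead of building the set of containing paths per key (twice per key, as A does), it keeps one integer counter per distinct key and makes a single pass over the distinct paths incrementing the counters of the keys each path contains, then takes min and filters.
import Mathlib
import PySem

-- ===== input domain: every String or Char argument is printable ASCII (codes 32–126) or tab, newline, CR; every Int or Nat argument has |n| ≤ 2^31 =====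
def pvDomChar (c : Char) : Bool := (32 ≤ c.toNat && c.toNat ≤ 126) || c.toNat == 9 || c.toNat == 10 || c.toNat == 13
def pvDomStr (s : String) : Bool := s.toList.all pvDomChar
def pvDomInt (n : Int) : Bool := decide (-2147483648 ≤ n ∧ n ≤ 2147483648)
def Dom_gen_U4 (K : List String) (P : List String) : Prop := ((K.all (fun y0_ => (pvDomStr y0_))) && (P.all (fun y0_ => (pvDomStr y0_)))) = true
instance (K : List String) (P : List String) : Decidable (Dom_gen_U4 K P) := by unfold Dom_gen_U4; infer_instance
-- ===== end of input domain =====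

-- B inverts the traversal: one counter per distinct key, one pass over the distinct paths incrementing them (A builds the set of containing paths per key, twice per key).


-- ===== PORT A =====
-- helper F(P, s): the set of paths of P that contain s as a substring
def F_py (P : List String) (s : String) : PySem.Set String :=
  P.foldl (fun Fs path => if PySem.Str.isIn s path then PySem.Set.add Fs path else Fs)
    PySem.Set.empty

-- len() of a set of strings is its number of (distinct) elements; kept as Nat,
-- exact for Python's nonnegative len used only in =, > and min here.
def gen_U4 (K : List String) (P : List String) : List String :=
  let minv : Option Nat :=
    K.foldl (fun minv s =>
      let length := (F_py P s).length
      match minv with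
      | none => some length
      | some m => if m > length then some length else some m) none
  K.foldl (fun U4 s =>
    if (some (F_py P s).length == minv) then PySem.Set.add U4 s else U4)
    PySem.Set.empty

-- ===== PORT B =====
-- counts = dict.fromkeys(K, 0); for p in dict.fromkeys(P): for s in counts: if s in p: counts[s] += 1
def gen_U4_alt (K : List String) (P : List String) : List String :=
  let counts0 : PySem.Dict String Nat :=
    K.foldl (fun d s => d.insert s 0) PySem.Dict.empty
  let counts : PySem.Dict String Nat :=
    (PySem.List.dedup P).foldl (fun c p =>
      c.keys.foldl (fun c2 s => if PySem.Str.isIn s p then c2.modify s 0 (· + 1) else c2) c)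
      counts0
  if PySem.Dict.size counts = 0 then PySem.Set.empty
  else
    match PySem.List.min? counts.values (fun x => x) with
    | none => PySem.Set.empty  -- unreachable: counts is nonempty
    | some m =>
        K.foldl (fun U4 s => if counts.getD s 0 = m then PySem.Set.add U4 s else U4)
          PySem.Set.empty

-- ===== PRECONDITION & SPEC =====
def Spec_gen_U4 (K : List String) (P : List String) (out : List String) : Prop := out = gen_U4_alt K P
instance (K : List String) (P : List String) (out : List String) : Decidable (Spec_gen_U4 K P out) := by unfold Spec_gen_U4; infer_instance

-- ===== CLAIM (what is proved, stated in full; the proofs are below) =====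
def Claim_equal_gen_U4 : Prop := ∀ (K : List String) (P : List String), Dom_gen_U4 K P → Spec_gen_U4 K P (gen_U4 K P)

-- ===== LEMMAS AND PROOFS =====

-- the count B maintains for a key s: number of distinct paths containing s
def cnt (P : List String) (s : String) : Nat :=
  (PySem.List.dedup P).countP (fun p => PySem.Str.isIn s p)

-- A's F(P,s) is the set of the filtered list
theorem F_py_eq (P : List String) (s : String) :
    F_py P s = PySem.Set.ofList (P.filter (fun p => PySem.Str.isIn s p)) := by
  rw [F_py, PySem.Set.ofList_eq_foldl, PySem.List.foldl_if_eq_foldl_filter]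
  rfl

-- |F(P,s)| equals B's counter value: both count the distinct paths containing s
theorem len_F_py (P : List String) (s : String) :
    (F_py P s).length = cnt P s := by
  rw [F_py_eq, cnt]
  have h1 : (PySem.Set.ofList (P.filter (fun p => PySem.Str.isIn s p))).Perm
      ((PySem.List.dedup P).filter (fun p => PySem.Str.isIn s p)) := by
    apply (List.perm_ext_iff_of_nodup (PySem.Set.nodup_ofList _)
      (List.Nodup.filter _ (PySem.List.nodup_dedup P))).mpr
    intro x
    simp [PySem.Set.mem_ofList, List.mem_filter]
  rw [h1.length_eq, List.countP_eq_length_filter]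

-- the inner loop of B: fold over a Nodup key list, incrementing the matching counters
theorem inner_getD (p : String) :
    ∀ (ks : List String), ks.Nodup → ∀ (c : PySem.Dict String Nat) (s : String),
      (ks.foldl (fun c2 k => if PySem.Str.isIn k p then c2.modify k 0 (· + 1) else c2) c).getD s 0
        = c.getD s 0 + (if s ∈ ks ∧ PySem.Str.isIn s p then 1 else 0) := by
  intro ks
  induction ks with
  | nil => intro _ c s; simp
  | cons k ks ih =>
    intro hnd c s
    have hnd' := hnd.of_cons
    have hk : k ∉ ks := (List.nodup_cons.mp hnd).1
    simp only [List.foldl_cons]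
    by_cases hkp : PySem.Str.isIn k p
    · rw [if_pos hkp, ih hnd', PySem.Dict.getD_modify]
      by_cases hsk : s = k
      · subst hsk
        rw [if_pos rfl, if_neg (fun h => hk h.1), if_pos ⟨by simp, hkp⟩]
      · rw [if_neg hsk]
        congr 1
        simp [List.mem_cons, hsk]
    · rw [if_neg hkp, ih hnd']
      congr 1
      by_cases hsk : s = k
      · subst hsk
        rw [if_neg (fun h => hkp h.2), if_neg (fun h => hkp h.2)]
      · simp [List.mem_cons, hsk]

theorem inner_keys (p : String) :
    ∀ (ks : List String) (c : PySem.Dict String Nat), (∀ k ∈ ks, c.contains k = true) →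
      (ks.foldl (fun c2 k => if PySem.Str.isIn k p then c2.modify k 0 (· + 1) else c2) c).keys
        = c.keys := by
  intro ks
  induction ks with
  | nil => intro c _; rfl
  | cons k ks ih =>
    intro c h
    simp only [List.foldl_cons]
    by_cases hkp : PySem.Str.isIn k p
    · rw [if_pos hkp]
      have hkeys : (c.modify k 0 (· + 1)).keys = c.keys := by
        rw [PySem.Dict.keys_modify,
          PySem.Dict.keys_insert_of_contains _ _ (h k (by simp))]
      rw [ih _ (fun k' hk' => by
        rw [PySem.Dict.contains_iff_mem_keys, hkeys, ← PySem.Dict.contains_iff_mem_keys]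
        exact h k' (List.mem_cons_of_mem _ hk')), hkeys]
    · rw [if_neg hkp, ih _ (fun k' hk' => h k' (List.mem_cons_of_mem _ hk'))]

-- the outer loop of B over the (distinct) paths
theorem outer_inv (Q : List String) (c : PySem.Dict String Nat) (hnd : c.keys.Nodup) :
    (Q.foldl (fun c p =>
        c.keys.foldl (fun c2 s => if PySem.Str.isIn s p then c2.modify s 0 (· + 1) else c2) c)
      c).keys = c.keys ∧
    ∀ s, (Q.foldl (fun c p =>
        c.keys.foldl (fun c2 s => if PySem.Str.isIn s p then c2.modify s 0 (· + 1) else c2) c)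
      c).getD s 0
      = c.getD s 0 + Q.countP (fun p => decide (s ∈ c.keys) && PySem.Str.isIn s p) := by
  induction Q generalizing c with
  | nil => exact ⟨rfl, fun s => by simp⟩
  | cons p Q ih =>
    simp only [List.foldl_cons]
    set c1 := c.keys.foldl (fun c2 s => if PySem.Str.isIn s p then c2.modify s 0 (· + 1) else c2) c with hc1
    have hk1 : c1.keys = c.keys := inner_keys p c.keys c (fun k hk => (PySem.Dict.contains_iff_mem_keys c k).mpr hk)
    have hnd1 : c1.keys.Nodup := hk1 ▸ hnd
    obtain ⟨hkQ, hgQ⟩ := ih c1 hnd1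
    refine ⟨hkQ.trans hk1, fun s => ?_⟩
    rw [hgQ s, inner_getD p c.keys hnd c s, hk1, List.countP_cons]
    by_cases hs : s ∈ c.keys <;> by_cases hp : PySem.Str.isIn s p <;>
      simp [hs] <;> omega

-- counts0 = dict.fromkeys(K, 0): keys are the distinct keys of K, every value 0
theorem counts0_keys (K : List String) :
    (K.foldl (fun d s => d.insert s 0) PySem.Dict.empty).keys = PySem.List.dedup K := by
  rw [PySem.Dict.keys_foldl_insert (f := fun _ _ => 0)]
  simp [PySem.Dict.keys_empty, PySem.Set.update_nil_left, PySem.List.dedup_eq_ofList]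

theorem counts0_getD (K : List String) (s : String) :
    (K.foldl (fun d s => d.insert s 0) PySem.Dict.empty).getD s 0 = 0 := by
  induction K using List.reverseRecOn with
  | nil => simp [PySem.Dict.getD_empty]
  | append_singleton K k ih =>
    rw [List.foldl_append, List.foldl_cons, List.foldl_nil]
    by_cases h : s = k
    · subst h; rw [PySem.Dict.getD_insert_self]
    · rw [PySem.Dict.getD_insert_of_ne _ 0 0 h, ih]

-- A's running-min loop, once seeded, is a foldl min
theorem runmin (f : String → Nat) :
    ∀ (L : List String) (m : Nat),
      L.foldl (fun mv s =>
        let length := f s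
        match mv with
        | none => some length
        | some m => if m > length then some length else some m) (some m)
      = some ((L.map f).foldl min m) := by
  intro L
  induction L with
  | nil => intro m; rfl
  | cons a L ih =>
    intro m
    simp only [List.foldl_cons, List.map_cons]
    have : (if m > f a then some (f a) else some m) = some (min m (f a)) := by
      split_ifs with h
      · simp [Nat.min_def]; omega
      · simp [Nat.min_def]; omega
    simpa [this] using ih (min m (f a))

theorem gen_U4_spec' : ∀ (K : List String) (P : List String), gen_U4 K P = gen_U4_alt K P := by
  intro K P
  cases K with
  | nil =>
    show gen_U4 [] P = gen_U4_alt [] P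
    rw [gen_U4, gen_U4_alt]
    have hkeys := (outer_inv (PySem.List.dedup P) PySem.Dict.empty
      (by rw [PySem.Dict.keys_empty]; exact List.nodup_nil)).1
    rw [PySem.Dict.keys_empty] at hkeys
    have hsz : PySem.Dict.size ((PySem.List.dedup P).foldl (fun c p =>
        c.keys.foldl (fun c2 s => if PySem.Str.isIn s p then c2.modify s 0 (· + 1) else c2) c)
        (([] : List String).foldl (fun d s => d.insert s 0) PySem.Dict.empty)) = 0 := by
      simpa [PySem.Dict.size, PySem.Dict.keys] using congrArg List.length hkeys
    simp only [List.foldl_nil] at hsz ⊢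
    rw [if_pos hsz]
  | cons s K' =>
    set f : String → Nat := cnt P with hf
    set counts0 := ((s :: K').foldl (fun d s => d.insert s 0) PySem.Dict.empty) with hc0
    set counts := (PySem.List.dedup P).foldl (fun c p =>
      c.keys.foldl (fun c2 s => if PySem.Str.isIn s p then c2.modify s 0 (· + 1) else c2) c)
      counts0 with hcounts
    have hk0 : counts0.keys = PySem.List.dedup (s :: K') := counts0_keys _
    have hnd0 : counts0.keys.Nodup := hk0 ▸ PySem.List.nodup_dedup _
    obtain ⟨hkeys, hgetD0⟩ := outer_inv (PySem.List.dedup P) counts0 hnd0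
    have hkeys' : counts.keys = PySem.List.dedup (s :: K') := hkeys.trans hk0
    have hnd : counts.keys.Nodup := hkeys' ▸ PySem.List.nodup_dedup _
    -- the stored count of every key of K is f
    have hgetD : ∀ k ∈ (s :: K'), counts.getD k 0 = f k := by
      intro k hk
      have hmem : k ∈ counts0.keys := by
        rw [hk0, PySem.List.mem_dedup]; exact hk
      rw [← hcounts] at hgetD0
      rw [hgetD0 k, counts0_getD, hf, cnt]
      simp only [hmem, decide_true, Bool.true_and, Nat.zero_add]
    -- counts.values = (dedup K).map f
    have hvals : counts.values = (PySem.List.dedup (s :: K')).map f := by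
      rw [PySem.Dict.values_eq_map_keys counts hnd 0, hkeys']
      apply List.map_congr_left
      intro k hk
      exact hgetD k (by rwa [← PySem.List.mem_dedup])
    -- counts is nonempty
    have hsz : ¬ PySem.Dict.size counts = 0 := by
      intro h
      have : counts.keys.length = 0 := by
        simpa [PySem.Dict.keys, PySem.Dict.size] using h
      rw [hkeys'] at this
      have : s ∈ PySem.List.dedup (s :: K') := by simp
      rw [List.eq_nil_of_length_eq_zero ‹(PySem.List.dedup (s :: K')).length = 0›] at this
      exact absurd this List.not_mem_nil
    -- B's min exists
    obtain ⟨mB, hmB⟩ : ∃ mB, PySem.List.min? counts.values (fun x => x) = some mB := by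
      rcases h : PySem.List.min? counts.values (fun x => x) with _ | mB
      · have hnil := (PySem.List.min?_eq_none_iff _ _).mp h
        exact absurd (by simpa [PySem.Dict.size, PySem.Dict.values] using congrArg List.length hnil) hsz
      · exact ⟨mB, rfl⟩
    have hmB_mem := PySem.List.min?_mem hmB
    have hmB_min := PySem.List.min?_isMin hmB
    -- A's running min is foldl min over the mapped lengths, which equal f
    have hmapf : ∀ L : List String, (L.map fun k => (F_py P k).length) = L.map f :=
      fun L => List.map_congr_left (fun k _ => len_F_py P k)
    set mA : Nat := ((K'.map f).foldl min (f s)) with hmA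
    have hminA :
        (s :: K').foldl (fun mv k =>
          let length := (F_py P k).length
          match mv with
          | none => some length
          | some m => if m > length then some length else some m) none = some mA := by
      simp only [List.foldl_cons]
      rw [runmin (fun k => (F_py P k).length) K' ((F_py P s).length), hmapf, len_F_py]
    -- mA is the minimum of (s::K').map f
    have hmA_mem : mA ∈ (s :: K').map f := by
      rw [List.map_cons]
      rcases PySem.List.foldl_min_mem (K'.map f) (f s) with h | h
      · rw [hmA, h]; exact List.mem_cons_self
      · exact List.mem_cons_of_mem _ h
    have hmA_min : ∀ x ∈ (s :: K').map f, mA ≤ x := by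
      intro x hx
      obtain ⟨le_self, le_all⟩ := PySem.List.foldl_min_le (K'.map f) (f s)
      rw [List.map_cons, List.mem_cons] at hx
      rcases hx with rfl | hx'
      · exact le_self
      · exact le_all x hx'
    -- the two minima agree
    have hAB : mA = mB := by
      obtain ⟨k, hk, hkv⟩ := List.mem_map.mp (hvals ▸ hmB_mem)
      have h1 : mA ≤ mB := hkv ▸ hmA_min (f k)
        (List.mem_map_of_mem (by rwa [← PySem.List.mem_dedup]))
      obtain ⟨k', hk', hk'v⟩ := List.mem_map.mp hmA_mem
      have h2 : mB ≤ mA := by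
        refine hk'v ▸ hmB_min (f k') ?_
        rw [hvals]
        exact List.mem_map_of_mem (by rwa [PySem.List.mem_dedup])
      omega
    -- finish: unfold both programs and compare the final folds
    show gen_U4 (s :: K') P = gen_U4_alt (s :: K') P
    rw [gen_U4, gen_U4_alt]
    simp only [← hc0, ← hcounts, hminA, if_neg hsz, hmB]
    apply PySem.List.foldl_congr_mem
    intro acc k hk
    have h2 : (some (F_py P k).length == some mA) = decide (counts.getD k 0 = mB) := by
      rw [hgetD k hk, ← hAB, hf, ← len_F_py]
      by_cases h : (F_py P k).length = mA <;> simp [h]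
    rw [h2]
    simp

-- ===== VERDICT (by name: the statement is the Claim_ definition above) =====
theorem gen_U4_spec : Claim_equal_gen_U4 := by
  intro K P _
  exact gen_U4_spec' K P
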